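-- pv_equiv track=rewrite | github.com/dportik/Stacks_pipeline | stacks-pipeline-scripts/Filter_Single_tsv.py | all_base
-- ===== SOURCE A (Python) =====
-- def all_base(v):
--     """
--     Function to select ALL base positions of the haplotypes
--     to retain all SNPs per locus.
--
--     Arguments:
--     v - A list containing the 'haplotypes' of all samples for a locus.
--     """
--     # initiate empty list to store new haplotypes values in
--     new_v_list = []
--
--     # get length of a single allele - the number of SNP sites.
--     # reverse sort haplotypes list to get longest entries first (avoids '-' characters),
--     # split first item by '/' to isolate a single allele, take its length
--     bases = len(sorted(v, reverse=True)[0].split('/')[0])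
--
--     # first check to see if > 1 SNP site present
--     if bases > 1:
--         # select random number from range of allele length for this locus
--         for i in range(0, bases):
--             new_v = []
--             #iterate over items in haplotypes list
--             for calls in v:
--                 # append '-' characters (missing data) as is
--                 if "/" not in calls:
--                     new_v.append(calls)
--                 #otherwise take position 'i' from alleles
--                 else:
--                     # if this happens to produce 'N/N', write '-' instead
--                     if "{}/{}".format(calls.split('/')[0][i], calls.split('/')[1][i]) == "N/N":
--                         new_v.append("-")
--                     # otherwise write the new allele combo
--                     else:
--                         new_v.append("{}/{}".format(calls.split('/')[0][i], calls.split('/')[1][i]))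
--             new_v_list.append(new_v)
--
--     # if only a single SNP site present, take all haplotypes as is
--     else:
--         new_v = []
--         for calls in v:
--             new_v.append(calls)
--         new_v_list.append(new_v)
--
--     return new_v_list, bases
-- ===== SOURCE B (Python) =====
-- def all_base(v):
--     """Row-per-sample decomposition: split each haplotype once, build its whole
--     row of per-site calls, then transpose by index into per-site lists."""
--     top = sorted(v, reverse=True)[0]
--     bases = len(top.split('/')[0])
--     if bases <= 1:
--         return [list(v)], bases
--     rows = []
--     for calls in v:
--         if '/' not in calls:
--             rows.append([calls] * bases)
--         else:
--             parts = calls.split('/')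
--             a0, a1 = parts[0], parts[1]
--             rows.append(['-' if a0[i] == 'N' and a1[i] == 'N' else a0[i] + '/' + a1[i]
--                          for i in range(bases)])
--     return [[row[i] for row in rows] for i in range(bases)], bases
-- ===== Notes on version B (the rewrite author's own statement) =====
-- stated objective: alternative
-- what changed: B loops over samples instead of sites: it splits each haplotype once, builds that sample's whole row of per-site calls, and then transposes by index into the per-site lists, where A re-splits every haplotype four times inside a per-site outer loop.
import Mathlib
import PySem

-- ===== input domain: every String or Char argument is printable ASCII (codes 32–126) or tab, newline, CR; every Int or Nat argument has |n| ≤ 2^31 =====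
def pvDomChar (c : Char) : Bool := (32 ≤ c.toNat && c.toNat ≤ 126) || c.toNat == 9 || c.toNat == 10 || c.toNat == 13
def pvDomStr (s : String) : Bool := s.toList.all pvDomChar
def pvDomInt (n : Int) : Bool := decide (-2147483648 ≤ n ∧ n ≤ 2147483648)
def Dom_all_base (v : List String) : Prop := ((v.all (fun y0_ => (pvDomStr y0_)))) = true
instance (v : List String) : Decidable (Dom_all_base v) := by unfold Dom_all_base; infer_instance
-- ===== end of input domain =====

-- B builds one row of per-site calls per sample (splitting each haplotype once) and
-- transposes by index, instead of A's per-site outer loop re-splitting every haplotype;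
-- objective: alternative decomposition.

-- ===== PORT A =====
-- literal port of A: per-position outer loop, per-sample inner append loop.
def all_base (v : List String) : List (List String) × Int :=
  let top := (PySem.List.sorted v (fun x => x) true).headD ""   -- sorted(v, reverse=True)[0]; headD unreached under Pre_
  let bases : Int := PySem.Str.len (((PySem.Str.split? top "/").getD []).headD "")
  if 1 < bases then
    ((PySem.List.pyRange 0 bases 1).map (fun i =>
      v.foldl (fun new_v calls =>
        if PySem.Str.isIn "/" calls = false then new_v ++ [calls]
        else
          -- calls.split('/')[0][i] and [1][i]; the getD defaults are unreached under Pre_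
          let c0 := (PySem.Str.pyGet? (((PySem.Str.split? calls "/").getD []).headD "") i).getD ' '
          let c1 := (PySem.Str.pyGet? ((((PySem.Str.split? calls "/").getD [])[1]?).getD "") i).getD ' '
          if String.ofList [c0, '/', c1] = "N/N" then new_v ++ ["-"]
          else new_v ++ [String.ofList [c0, '/', c1]]) []),
     bases)
  else
    ([v.foldl (fun new_v calls => new_v ++ [calls]) []], bases)

-- ===== PORT B =====
-- literal port of Source B: one row per sample, then transpose by index.
def all_base_alt (v : List String) : List (List String) × Int :=
  let top := (PySem.List.sorted v (fun x => x) true).headD ""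
  let bases : Int := PySem.Str.len (((PySem.Str.split? top "/").getD []).headD "")
  if bases ≤ 1 then ([v], bases)
  else
    let rows := v.map (fun calls =>
      if PySem.Str.isIn "/" calls = false then PySem.List.pyRepeat [calls] bases
      else
        let a0 := ((PySem.Str.split? calls "/").getD []).headD ""
        let a1 := (((PySem.Str.split? calls "/").getD [])[1]?).getD ""
        (PySem.List.pyRange 0 bases 1).map (fun i =>
          let c0 := (PySem.Str.pyGet? a0 i).getD ' '
          let c1 := (PySem.Str.pyGet? a1 i).getD ' '
          if c0 = 'N' ∧ c1 = 'N' then "-" else String.ofList [c0, '/', c1]))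
    ((PySem.List.pyRange 0 bases 1).map (fun i => rows.map (fun r => (PySem.List.pyGet? r i).getD "")), bases)

-- ===== PRECONDITION & SPEC =====
-- helper for Pre_: the number of SNP sites A reads off the lexicographically largest haplotype
def pvBases (v : List String) : Nat :=
  ((PySem.Chars.splitOn ((PySem.List.sorted (v.map String.toList) (fun x => x) true).headD []) ['/']).headD []).length

-- Pre_ excludes exactly the inputs where Python A raises: the empty list (IndexError on
-- sorted(v)[0]) and, when more than one site is present, any haplotype containing '/'
-- whose first or second allele is shorter than the site count (IndexError on allele[i]).
def Pre_all_base (v : List String) : Prop :=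
  v ≠ [] ∧ (1 < pvBases v → ∀ s ∈ v, PySem.Str.isIn "/" s = true →
    pvBases v ≤ ((PySem.Chars.splitOn s.toList ['/']).headD []).length ∧
    pvBases v ≤ (((PySem.Chars.splitOn s.toList ['/'])[1]?).getD []).length)
instance (v : List String) : Decidable (Pre_all_base v) := by unfold Pre_all_base; infer_instance

def pvWitness_all_base : List String := ["A/T", "C/G", "-"]

def Spec_all_base (v : List String) (out : List (List String) × Int) : Prop := out = all_base_alt v
instance (v : List String) (out : List (List String) × Int) : Decidable (Spec_all_base v out) := by unfold Spec_all_base; infer_instance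

-- ===== CLAIM (what is proved, stated in full; the proofs are below) =====
def Claim_equal_all_base : Prop := ∀ (v : List String), Dom_all_base v → Pre_all_base v → Spec_all_base v (all_base v)

-- ===== LEMMAS AND PROOFS =====

theorem pv_ofList_eq_NN (a b : Char) : (String.ofList [a, '/', b] = "N/N") ↔ (a = 'N' ∧ b = 'N') := by
  rw [show ("N/N" : String) = String.ofList ['N', '/', 'N'] by decide]
  constructor
  · intro h
    have h2 := congrArg String.toList h
    simp [String.toList_ofList] at h2
    exact h2
  · rintro ⟨rfl, rfl⟩; rfl

-- A's inner per-sample append loop, as a map (one column, site index i)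
theorem pv_foldlA (v : List String) (i : Int) (acc : List String) :
    v.foldl (fun new_v calls =>
        if PySem.Str.isIn "/" calls = false then new_v ++ [calls]
        else
          if String.ofList [(PySem.Str.pyGet? (((PySem.Str.split? calls "/").getD []).headD "") i).getD ' ', '/',
                (PySem.Str.pyGet? ((((PySem.Str.split? calls "/").getD [])[1]?).getD "") i).getD ' '] = "N/N"
          then new_v ++ ["-"]
          else new_v ++ [String.ofList [(PySem.Str.pyGet? (((PySem.Str.split? calls "/").getD []).headD "") i).getD ' ', '/',
                (PySem.Str.pyGet? ((((PySem.Str.split? calls "/").getD [])[1]?).getD "") i).getD ' ']]) acc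
    = acc ++ v.map (fun calls =>
        if PySem.Str.isIn "/" calls = false then calls
        else
          if String.ofList [(PySem.Str.pyGet? (((PySem.Str.split? calls "/").getD []).headD "") i).getD ' ', '/',
                (PySem.Str.pyGet? ((((PySem.Str.split? calls "/").getD [])[1]?).getD "") i).getD ' '] = "N/N"
          then "-"
          else String.ofList [(PySem.Str.pyGet? (((PySem.Str.split? calls "/").getD []).headD "") i).getD ' ', '/',
                (PySem.Str.pyGet? ((((PySem.Str.split? calls "/").getD [])[1]?).getD "") i).getD ' ']) := by
  induction v generalizing acc with
  | nil => simp
  | cons x xs ih =>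
    simp only [List.foldl_cons, List.map_cons]
    split_ifs <;> (rw [ih]; simp)

-- ===== VERDICT (by name: the statement is the Claim_ definition above) =====
theorem all_base_spec : Claim_equal_all_base := by
  intro v _ _
  unfold Spec_all_base all_base all_base_alt
  dsimp only
  rw [PySem.Str.len_eq]
  generalize (((PySem.Str.split? ((PySem.List.sorted v (fun x => x) true).headD "") "/").getD []).headD "") = m
  generalize hn : m.toList.length = n
  split_ifs with h1 h2
  · omega
  · -- more than one site: column i of A = row transpose of B
    clear h2
    rw [PySem.List.pyRange_zero_natCast]
    refine Prod.ext ?_ rfl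
    dsimp only
    apply List.map_congr_left
    intro i hi
    obtain ⟨k, hk, rfl⟩ := List.mem_map.mp hi
    have hkn : k < n := List.mem_range.mp hk
    rw [pv_foldlA, List.map_map]
    simp only [List.nil_append]
    apply List.map_congr_left
    intro calls _
    dsimp only [Function.comp]
    by_cases hp : PySem.Str.isIn "/" calls = false
    · rw [if_pos hp, if_pos hp, PySem.List.pyRepeat_singleton, PySem.List.pyGet?_natCast]
      simp [hkn]
    · rw [if_neg hp, if_neg hp, List.map_map, PySem.List.pyGet?_natCast]
      simp only [List.getElem?_map, List.getElem?_range, hkn, Function.comp,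
        Option.map_some, Option.getD_some]
      simp [pv_ofList_eq_NN]
  · -- a single site: A copies v element by element
    refine Prod.ext ?_ rfl
    dsimp only
    have : v.foldl (fun new_v calls => new_v ++ [calls]) [] = v :=
      PySem.List.foldl_append_singleton v []
    rw [this]
  · omega
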